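-- pv_equiv track=rewrite | github.com/randomparity/vpo | scripts/find_test_samples.py | _classify_attachment
-- ===== SOURCE A (Python) =====
-- _FONT_EXTENSIONS = {"ttf", "otf", "woff", "woff2"}
--
-- _IMAGE_EXTENSIONS = {"png", "jpg", "jpeg", "gif", "bmp"}
--
-- _FONT_CODECS = {"ttf", "otf", "application/x-truetype-font", "application/x-font-ttf"}
--
-- _IMAGE_CODECS = {"mjpeg", "png", "bmp", "gif", "image/jpeg", "image/png"}
--
-- def _classify_attachment(codec: str | None, title: str | None) -> str | None:
--     """Classify an attachment track as 'image', 'font', or None."""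
--     codec_lower = (codec or "").casefold().strip()
--     title_lower = (title or "").casefold().strip()
--
--     if codec_lower in _FONT_CODECS:
--         return "font"
--     if codec_lower in _IMAGE_CODECS:
--         return "image"
--
--     # Check title/filename for extension hints
--     for ext in _FONT_EXTENSIONS:
--         if title_lower.endswith(f".{ext}"):
--             return "font"
--     for ext in _IMAGE_EXTENSIONS:
--         if title_lower.endswith(f".{ext}"):
--             return "image"
--
--     return None
-- ===== SOURCE B (Python) =====
-- _FONT_EXTENSIONS = {"ttf", "otf", "woff", "woff2"}
--
-- _IMAGE_EXTENSIONS = {"png", "jpg", "jpeg", "gif", "bmp"}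
--
-- _FONT_CODECS = {"ttf", "otf", "application/x-truetype-font", "application/x-font-ttf"}
--
-- _IMAGE_CODECS = {"mjpeg", "png", "bmp", "gif", "image/jpeg", "image/png"}
--
--
-- def _classify_attachment(codec: str | None, title: str | None) -> str | None:
--     """Classify an attachment track as 'image', 'font', or None."""
--     codec_lower = (codec or "").casefold().strip()
--     if codec_lower in _FONT_CODECS:
--         return "font"
--     if codec_lower in _IMAGE_CODECS:
--         return "image"
--
--     # Derive the extension once, then look it up directly.
--     title_lower = (title or "").casefold().strip()
--     ext = title_lower.rsplit(".", 1)[-1] if "." in title_lower else ""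
--     if ext in _FONT_EXTENSIONS:
--         return "font"
--     if ext in _IMAGE_EXTENSIONS:
--         return "image"
--     return None
-- ===== Notes on version B (the rewrite author's own statement) =====
-- stated objective: simpler
-- what changed: For the title, B derives the extension (the suffix after the last dot) once and looks it up in the extension sets, instead of A's two loops that test every candidate extension with endswith.
import Mathlib
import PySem

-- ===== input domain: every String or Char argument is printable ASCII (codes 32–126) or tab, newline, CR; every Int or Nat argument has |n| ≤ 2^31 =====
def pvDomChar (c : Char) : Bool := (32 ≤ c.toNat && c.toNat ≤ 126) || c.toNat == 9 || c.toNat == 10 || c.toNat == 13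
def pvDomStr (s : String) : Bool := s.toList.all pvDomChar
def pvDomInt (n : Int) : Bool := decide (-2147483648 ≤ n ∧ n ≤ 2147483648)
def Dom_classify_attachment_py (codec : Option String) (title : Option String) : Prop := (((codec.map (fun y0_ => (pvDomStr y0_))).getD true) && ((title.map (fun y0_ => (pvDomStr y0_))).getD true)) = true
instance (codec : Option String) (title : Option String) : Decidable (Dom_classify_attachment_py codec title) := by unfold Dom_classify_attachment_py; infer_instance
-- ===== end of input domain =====

-- B replaces A's endswith-scan over every candidate extension by extracting the
-- title's extension once (suffix after the last '.') and looking it up (objective: simpler).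
-- casefold is ported as lower; exact on the ASCII domain stated above.

-- ===== PORT A =====
def pvFontCodecs : List String := ["ttf", "otf", "application/x-truetype-font", "application/x-font-ttf"]
def pvImageCodecs : List String := ["mjpeg", "png", "bmp", "gif", "image/jpeg", "image/png"]
-- extensions kept as char lists so that Python's f".{ext}" is the literal '.' :: ext
def pvFontExts : List (List Char) := [['t','t','f'], ['o','t','f'], ['w','o','f','f'], ['w','o','f','f','2']]
def pvImageExts : List (List Char) := [['p','n','g'], ['j','p','g'], ['j','p','e','g'], ['g','i','f'], ['b','m','p']]

-- literal transliteration of A: the for-loops with early return are List.any over the set's elements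
def classify_attachment_py (codec : Option String) (title : Option String) : Option String :=
  let codec_lower := PySem.Str.strip (PySem.Str.lower (codec.getD ""))
  let title_lower := (PySem.Str.strip (PySem.Str.lower (title.getD ""))).toList
  if pvFontCodecs.contains codec_lower then some "font"
  else if pvImageCodecs.contains codec_lower then some "image"
  else if pvFontExts.any (fun ext => PySem.Chars.endswith title_lower ('.' :: ext)) then some "font"
  else if pvImageExts.any (fun ext => PySem.Chars.endswith title_lower ('.' :: ext)) then some "image"
  else none

-- ===== PORT B =====
-- rsplit('.', 1)[-1] = the suffix after the LAST '.' (exact for a title containing '.'):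
def pvExtAfterLastDot (tl : List Char) : List Char :=
  (tl.reverse.takeWhile (· ≠ '.')).reverse

def classify_attachment_py_alt (codec : Option String) (title : Option String) : Option String :=
  let codec_lower := PySem.Str.strip (PySem.Str.lower (codec.getD ""))
  if pvFontCodecs.contains codec_lower then some "font"
  else if pvImageCodecs.contains codec_lower then some "image"
  else
    let title_lower := (PySem.Str.strip (PySem.Str.lower (title.getD ""))).toList
    let ext := if title_lower.contains '.' then pvExtAfterLastDot title_lower else []
    if pvFontExts.contains ext then some "font"
    else if pvImageExts.contains ext then some "image"
    else none

-- ===== PRECONDITION & SPEC =====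
def Spec_classify_attachment_py (codec : Option String) (title : Option String) (out : Option String) : Prop := out = classify_attachment_py_alt codec title
instance (codec : Option String) (title : Option String) (out : Option String) : Decidable (Spec_classify_attachment_py codec title out) := by unfold Spec_classify_attachment_py; infer_instance

-- ===== CLAIM (what is proved, stated in full; the proofs are below) =====
def Claim_equal_classify_attachment_py : Prop := ∀ (codec : Option String) (title : Option String), Dom_classify_attachment_py codec title → Spec_classify_attachment_py codec title (classify_attachment_py codec title)

-- ===== LEMMAS AND PROOFS =====

-- core: a dot-free word er followed by '.' is a prefix of r iff r contains '.'
-- and er is exactly r's maximal dot-free prefix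
theorem pv_prefix_dot_iff (r er : List Char) (h : '.' ∉ er) :
    (er ++ ['.']) <+: r ↔ ('.' ∈ r ∧ r.takeWhile (· ≠ '.') = er) := by
  induction r generalizing er with
  | nil =>
    simp only [List.prefix_nil, List.not_mem_nil, false_and, iff_false]
    intro hx
    exact absurd hx (by simp)
  | cons c r' ih =>
    cases er with
    | nil =>
      by_cases hc : c = '.'
      · subst hc; simp [List.takeWhile]
      · simp [List.takeWhile, hc, List.cons_prefix_cons, Ne.symm hc]
    | cons a er' =>
      have ha : a ≠ '.' := fun hx => h (hx ▸ List.mem_cons_self ..)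
      have h' : '.' ∉ er' := fun hx => h (List.mem_cons_of_mem _ hx)
      by_cases hc : c = '.'
      · subst hc
        simp [List.cons_prefix_cons, ha]
      · simp only [List.cons_append, List.cons_prefix_cons, List.mem_cons,
          List.takeWhile_cons, ih er' h', ne_eq, hc, not_false_eq_true, decide_true,
          if_true, List.cons_eq_cons]
        constructor
        · rintro ⟨rfl, hd, ht⟩
          exact ⟨Or.inr hd, rfl, ht⟩
        · rintro ⟨hd, rfl, ht⟩
          refine ⟨rfl, ?_, ht⟩
          rcases hd with hd | hd
          · exact absurd hd.symm hc
          · exact hd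

-- bridge: endswith ('.'+ext) is "title contains '.' and its extension is ext",
-- for a nonempty dot-free ext
theorem pv_endswith_iff (tl e : List Char) (he : '.' ∉ e) :
    PySem.Chars.endswith tl ('.' :: e) = (tl.contains '.' && pvExtAfterLastDot tl == e) := by
  rw [Bool.eq_iff_iff, PySem.Chars.endswith_iff]
  have : ('.' :: e) <:+ tl ↔ (e.reverse ++ ['.']) <+: tl.reverse := by
    rw [← List.reverse_prefix]; simp
  rw [this, pv_prefix_dot_iff _ _ (by simpa using he)]
  simp only [Bool.and_eq_true, List.contains_eq_mem, decide_eq_true_eq, beq_iff_eq,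
    pvExtAfterLastDot]
  constructor
  · rintro ⟨h1, h2⟩
    exact ⟨List.mem_reverse.mp h1, by rw [h2]; simp⟩
  · rintro ⟨h1, h2⟩
    refine ⟨List.mem_reverse.mpr h1, ?_⟩
    have := congrArg List.reverse h2
    simpa using this

theorem pv_any_exts (L : List (List Char)) (tl : List Char)
    (hL : ∀ e ∈ L, '.' ∉ e) :
    L.any (fun ext => PySem.Chars.endswith tl ('.' :: ext))
      = (tl.contains '.' && L.contains (pvExtAfterLastDot tl)) := by
  induction L with
  | nil => simp
  | cons e L ih =>
    simp only [List.any_cons, ih (fun x hx => hL x (List.mem_cons_of_mem _ hx)),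
      pv_endswith_iff tl e (hL e (List.mem_cons_self ..)), List.contains_cons]
    cases tl.contains '.' <;> cases (pvExtAfterLastDot tl == e) <;> simp

-- ===== VERDICT (by name: the statement is the Claim_ definition above) =====
theorem classify_attachment_py_spec : Claim_equal_classify_attachment_py := by
  intro codec title _
  unfold Spec_classify_attachment_py classify_attachment_py classify_attachment_py_alt
  simp only
  set tl := (PySem.Str.strip (PySem.Str.lower (title.getD ""))).toList with htl
  rw [pv_any_exts pvFontExts tl (by decide), pv_any_exts pvImageExts tl (by decide)]
  cases h : tl.contains '.' with
  | true => simp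
  | false => simp [pvFontExts, pvImageExts]
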